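-- pv_equiv track=rewrite | github.com/pgmmpk/pypatgen | patgen/__init__.py | format_dictionary_word
-- ===== SOURCE A (Python) =====
-- MISSED_HYPHEN = '.'
--
-- FALSE_HYPHEN  = '*'
--
-- TRUE_HYPHEN   = '-'
--
-- def format_dictionary_word(text, true_hyphens, predicted_hyphens=None):
--     if predicted_hyphens is None:
--         predicted_hyphens = set(i for i in range(len(true_hyphens)) if true_hyphens[i] in (TRUE_HYPHEN, MISSED_HYPHEN))
--     out = []
--
--     for i in range(len(text)+1):
--         if i > 0:
--             out.append(text[i-1])
--
--         if i in predicted_hyphens: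
--             if true_hyphens[i] in (TRUE_HYPHEN, MISSED_HYPHEN):
--                 out.append(TRUE_HYPHEN)
--             else:
--                 out.append(FALSE_HYPHEN)
--         else:
--             if true_hyphens[i] in (TRUE_HYPHEN, MISSED_HYPHEN):
--                 out.append(MISSED_HYPHEN)
--
--     return ''.join(out)
-- ===== SOURCE B (Python) =====
-- MISSED_HYPHEN = '.'
--
-- FALSE_HYPHEN  = '*'
--
-- TRUE_HYPHEN   = '-'
--
-- def format_dictionary_word(text, true_hyphens, predicted_hyphens=None):
--     # set-algebra formulation: classify every index once via set operations,
--     # fill a marker table, then interleave text with table lookups.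
--     truth = set(i for i in range(len(text) + 1) if true_hyphens[i] in (TRUE_HYPHEN, MISSED_HYPHEN))
--     predicted = truth if predicted_hyphens is None else set(predicted_hyphens)
--     marks = {}
--     for i in predicted & truth:
--         marks[i] = TRUE_HYPHEN
--     for i in predicted - truth:
--         marks[i] = FALSE_HYPHEN
--     for i in truth - predicted:
--         marks[i] = MISSED_HYPHEN
--     return marks.get(0, '') + ''.join(c + marks.get(i + 1, '') for i, c in enumerate(text))
-- ===== Notes on version B (the rewrite author's own statement) =====
-- stated objective: alternative
-- what changed: Replaced A's per-position if/else loop by set algebra: B classifies indices once via set intersection/difference (predicted&truth, predicted-truth, truth-predicted) into a marker dictionary, then interleaves the text with table lookups.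
import Mathlib
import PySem

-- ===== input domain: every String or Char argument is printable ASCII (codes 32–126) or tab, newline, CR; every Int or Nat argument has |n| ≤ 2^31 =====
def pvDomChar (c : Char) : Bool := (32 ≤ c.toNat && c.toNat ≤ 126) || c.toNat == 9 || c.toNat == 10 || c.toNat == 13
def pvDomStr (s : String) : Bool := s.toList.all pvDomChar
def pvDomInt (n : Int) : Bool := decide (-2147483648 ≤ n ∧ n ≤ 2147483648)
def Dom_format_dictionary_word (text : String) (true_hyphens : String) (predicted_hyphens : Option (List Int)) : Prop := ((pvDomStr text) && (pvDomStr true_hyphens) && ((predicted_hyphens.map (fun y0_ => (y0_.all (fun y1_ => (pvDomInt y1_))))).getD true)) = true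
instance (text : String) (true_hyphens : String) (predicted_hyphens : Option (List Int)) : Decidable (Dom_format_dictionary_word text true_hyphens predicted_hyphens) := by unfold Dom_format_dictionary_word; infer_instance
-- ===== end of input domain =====

-- B replaces A's per-position branching loop by set algebra: it classifies the indices once
-- with set intersection/difference into a marker table, then interleaves text with table lookups
-- (objective: alternative).

-- ===== PORT A =====
-- true_hyphens[i] in (TRUE_HYPHEN, MISSED_HYPHEN)
def fdwIsMark (c : Char) : Bool := c == '-' || c == '.'

-- the 'predicted_hyphens is None' default: set(i for i in range(len(true_hyphens)) if true_hyphens[i] in ('-','.'))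
-- (indices are always in range here, so List.getD is exact)
def fdwDefaultPred (th : List Char) : List Int :=
  PySem.Set.ofList (((List.range th.length).filter (fun i => fdwIsMark (th.getD i ' '))).map (fun (i : Nat) => (i : Int)))

-- A's loop body: the conditional appends, in source order.
-- th.getD i ' ' is Python's true_hyphens[i]; Pre_ guarantees i < len(true_hyphens), where it is exact.
def fdwStepA (tl th : List Char) (pred : List Int) (acc : List Char) (i : Nat) : List Char :=
  let acc := if i > 0 then acc ++ [tl.getD (i - 1) ' '] else acc
  if pred.contains (i : Int) then
    if fdwIsMark (th.getD i ' ') then acc ++ ['-'] else acc ++ ['*']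
  else
    if fdwIsMark (th.getD i ' ') then acc ++ ['.'] else acc

def format_dictionary_word (text : String) (true_hyphens : String) (predicted_hyphens : Option (List Int)) : String :=
  let tl := text.toList
  let th := true_hyphens.toList
  let pred : List Int :=
    match predicted_hyphens with
    | some l => l
    | none => fdwDefaultPred th
  String.mk ((List.range (tl.length + 1)).foldl (fdwStepA tl th pred) [])

-- ===== PORT B =====
def fdwIsMarkB (c : Char) : Bool := c == '-' || c == '.'

-- truth = set(i for i in range(len(text) + 1) if true_hyphens[i] in ('-','.'))
-- (th.getD i ' ' is true_hyphens[i]; Pre_ guarantees i < len(true_hyphens), where it is exact)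
def fdwTruthB (tl th : List Char) : PySem.Set Int :=
  PySem.Set.ofList (((List.range (tl.length + 1)).filter (fun i => fdwIsMarkB (th.getD i ' '))).map (fun (i : Nat) => (i : Int)))

-- the three classifying loops: marks[i] = '-' / '*' / '.' over the three disjoint index sets
-- (Python iterates the sets in hash order; the dict is only looked up afterwards, and each loop
-- writes one constant value over disjoint keys, so every lookup is order-independent)
def fdwMarksB (predicted truth : PySem.Set Int) : PySem.Dict Int (List Char) :=
  let d := (PySem.Set.inter predicted truth).foldl (fun d i => d.insert i ['-']) PySem.Dict.empty
  let d := (PySem.Set.diff predicted truth).foldl (fun d i => d.insert i ['*']) d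
  (PySem.Set.diff truth predicted).foldl (fun d i => d.insert i ['.']) d

def format_dictionary_word_alt (text : String) (true_hyphens : String) (predicted_hyphens : Option (List Int)) : String :=
  let tl := text.toList
  let th := true_hyphens.toList
  let truth := fdwTruthB tl th
  let predicted : PySem.Set Int :=
    match predicted_hyphens with
    | some l => PySem.Set.ofList l
    | none => truth
  let marks := fdwMarksB predicted truth
  -- marks.get(0, '') + ''.join(c + marks.get(i + 1, '') for i, c in enumerate(text))
  String.mk (marks.getD 0 [] ++
    ((PySem.List.enumerate tl 0).map (fun p => p.2 :: marks.getD (p.1 + 1) [])).flatten)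

-- ===== PRECONDITION & SPEC =====
-- A indexes true_hyphens[i] for every i in 0..len(text); Pre_ excludes exactly the inputs where that raises IndexError.
def Pre_format_dictionary_word (text : String) (true_hyphens : String) (predicted_hyphens : Option (List Int)) : Prop :=
  text.toList.length + 1 ≤ true_hyphens.toList.length
instance (text : String) (true_hyphens : String) (predicted_hyphens : Option (List Int)) : Decidable (Pre_format_dictionary_word text true_hyphens predicted_hyphens) := by unfold Pre_format_dictionary_word; infer_instance

def pvWitness_format_dictionary_word : String × String × Option (List Int) := ("hyphen", "-hy.he*n-", some [0, 3])

def Spec_format_dictionary_word (text : String) (true_hyphens : String) (predicted_hyphens : Option (List Int)) (out : String) : Prop := out = format_dictionary_word_alt text true_hyphens predicted_hyphens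
instance (text : String) (true_hyphens : String) (predicted_hyphens : Option (List Int)) (out : String) : Decidable (Spec_format_dictionary_word text true_hyphens predicted_hyphens out) := by unfold Spec_format_dictionary_word; infer_instance

-- ===== CLAIM (what is proved, stated in full; the proofs are below) =====
def Claim_equal_format_dictionary_word : Prop := ∀ (text : String) (true_hyphens : String) (predicted_hyphens : Option (List Int)), Dom_format_dictionary_word text true_hyphens predicted_hyphens → Pre_format_dictionary_word text true_hyphens predicted_hyphens → Spec_format_dictionary_word text true_hyphens predicted_hyphens (format_dictionary_word text true_hyphens predicted_hyphens)

-- ===== LEMMAS AND PROOFS =====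

-- the marker A's branch produces at position i, as a pure value
def fdwMarker (th : List Char) (pred : List Int) (i : Nat) : List Char :=
  if pred.contains (i : Int) then
    if fdwIsMark (th.getD i ' ') then ['-'] else ['*']
  else
    if fdwIsMark (th.getD i ' ') then ['.'] else []

-- A's step, rewritten as 'append the char (if any) and then the marker'.
lemma fdwStepA_eq (tl th : List Char) (pred : List Int) (acc : List Char) (i : Nat) :
    fdwStepA tl th pred acc i =
      acc ++ (if i > 0 then [tl.getD (i - 1) ' '] else []) ++ fdwMarker th pred i := by
  unfold fdwStepA fdwMarker
  split_ifs <;> simp_all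

-- A's whole loop equals the interleaving of text with markers.
lemma fdwLoop_eq (tl th : List Char) (pred : List Int) (n : Nat) :
    (List.range (n + 1)).foldl (fdwStepA tl th pred) [] =
      fdwMarker th pred 0 ++
        ((List.range n).map (fun i => tl.getD i ' ' :: fdwMarker th pred (i + 1))).flatten := by
  induction n with
  | zero => simp [fdwStepA_eq]
  | succ n ih =>
      rw [List.range_succ, List.foldl_append, ih, List.range_succ]
      simp [fdwStepA_eq]

-- a constant-value insertion loop, looked up
lemma fdwFoldInsert_get? (l : List Int) (v : List Char) (d : PySem.Dict Int (List Char)) (k : Int) :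
    ((l.foldl (fun d i => d.insert i v) d).get? k) = if k ∈ l then some v else d.get? k := by
  induction l generalizing d with
  | nil => simp
  | cons h t ih =>
      simp only [List.foldl_cons, ih, List.mem_cons]
      by_cases hk : k ∈ t
      · simp [hk]
      · by_cases he : k = h
        · subst he; simp [hk, PySem.Dict.get?_insert_self]
        · simp [hk, he, PySem.Dict.get?_insert_of_ne _ _ he]

-- what the marker table holds at any key, in terms of set membership
lemma fdwMarksB_getD (P T : PySem.Set Int) (k : Int) :
    (fdwMarksB P T).getD k [] =
      if k ∈ P then (if k ∈ T then ['-'] else ['*'])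
      else (if k ∈ T then ['.'] else []) := by
  unfold fdwMarksB PySem.Dict.getD
  rw [fdwFoldInsert_get?, fdwFoldInsert_get?, fdwFoldInsert_get?]
  by_cases hP : k ∈ P <;> by_cases hT : k ∈ T <;>
    simp [PySem.Set.mem_inter, PySem.Set.mem_diff, hP, hT]

-- membership in B's truth set, for the positions 0..len(text) the output reads
lemma fdwMem_truthB (tl th : List Char) (i : Nat) (hi : i ≤ tl.length) :
    ((i : Int) ∈ fdwTruthB tl th) ↔ fdwIsMarkB (th.getD i ' ') = true := by
  unfold fdwTruthB
  rw [PySem.Set.mem_ofList]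
  simp only [List.mem_map, List.mem_filter, List.mem_range]
  constructor
  · rintro ⟨j, ⟨_, hm⟩, he⟩
    have : j = i := by exact_mod_cast he
    subst this; exact hm
  · intro hm
    exact ⟨i, ⟨by omega, hm⟩, rfl⟩

-- membership in A's default predicted set (out-of-range indices read the default ' ', not a mark)
lemma fdwMem_default (th : List Char) (i : Nat) :
    (fdwDefaultPred th).contains (i : Int) = true ↔ fdwIsMark (th.getD i ' ') = true := by
  unfold fdwDefaultPred
  rw [List.contains_iff_mem, PySem.Set.mem_ofList]
  simp only [List.mem_map, List.mem_filter, List.mem_range]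
  constructor
  · rintro ⟨j, ⟨_, hm⟩, he⟩
    have : j = i := by exact_mod_cast he
    subst this; exact hm
  · intro hm
    by_cases hi : i < th.length
    · exact ⟨i, ⟨hi, hm⟩, rfl⟩
    · exfalso
      rw [List.getD_eq_default _ _ (by omega)] at hm
      simp [fdwIsMark] at hm

-- the table lookup equals A's branch marker at one position
-- (P and T abstract B's 'predicted' and 'truth' sets; hP/hT say what membership at i means)
lemma fdwMarker_eq_table (th : List Char) (pred : List Int) (P T : PySem.Set Int) (i : Nat)
    (hP : ((i : Int) ∈ P) ↔ pred.contains (i : Int) = true)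
    (hT : ((i : Int) ∈ T) ↔ fdwIsMark (th.getD i ' ') = true) :
    fdwMarker th pred i = (fdwMarksB P T).getD (i : Int) [] := by
  rw [fdwMarksB_getD, fdwMarker]
  by_cases h1 : pred.contains (i : Int) = true <;>
    by_cases h2 : fdwIsMark (th.getD i ' ') = true <;>
      simp_all

-- B's enumerate-comprehension, re-indexed over List.range
lemma fdwEnum_eq (tl : List Char) (m : PySem.Dict Int (List Char)) :
    ((PySem.List.enumerate tl 0).map (fun p => p.2 :: m.getD (p.1 + 1) [])).flatten =
      ((List.range tl.length).map (fun i => tl.getD i ' ' :: m.getD ((i : Int) + 1) [])).flatten := by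
  rw [PySem.List.enumerate_eq_map_pyRange (d := ' ')]
  simp [PySem.List.len, PySem.List.pyRange_zero_natCast, Function.comp_def,
    PySem.List.pyGetD_natCast, List.getD]

-- ===== VERDICT (by name: the statement is the Claim_ definition above) =====
theorem format_dictionary_word_spec : Claim_equal_format_dictionary_word := by
  intro text true_hyphens predicted_hyphens _ _
  unfold Spec_format_dictionary_word format_dictionary_word format_dictionary_word_alt
  cases predicted_hyphens with
  | some l =>
      dsimp only
      rw [fdwLoop_eq, fdwEnum_eq]
      have hM : ∀ i : Nat, i ≤ text.toList.length →
          fdwMarker true_hyphens.toList l i =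
            (fdwMarksB (PySem.Set.ofList l) (fdwTruthB text.toList true_hyphens.toList)).getD (i : Int) [] :=
        fun i hi => fdwMarker_eq_table true_hyphens.toList l _ _ i
          (by rw [PySem.Set.mem_ofList]; simp)
          (fdwMem_truthB text.toList true_hyphens.toList i hi)
      have h0 := hM 0 (by omega)
      push_cast at h0
      rw [h0]
      congr 3
      apply List.map_congr_left
      intro i hi
      rw [List.mem_range] at hi
      have := hM (i + 1) (by omega)
      push_cast at this
      rw [this]
  | none =>
      dsimp only
      rw [fdwLoop_eq, fdwEnum_eq]
      have hM : ∀ i : Nat, i ≤ text.toList.length →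
          fdwMarker true_hyphens.toList (fdwDefaultPred true_hyphens.toList) i =
            (fdwMarksB (fdwTruthB text.toList true_hyphens.toList) (fdwTruthB text.toList true_hyphens.toList)).getD (i : Int) [] :=
        fun i hi => fdwMarker_eq_table true_hyphens.toList _ _ _ i
          ((fdwMem_truthB text.toList true_hyphens.toList i hi).trans (fdwMem_default true_hyphens.toList i).symm)
          (fdwMem_truthB text.toList true_hyphens.toList i hi)
      have h0 := hM 0 (by omega)
      push_cast at h0
      rw [h0]
      congr 3
      apply List.map_congr_left
      intro i hi
      rw [List.mem_range] at hi
      have := hM (i + 1) (by omega)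
      push_cast at this
      rw [this]
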